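-- pv_equiv track=rewrite | github.com/astoanne/enhanced_basecalling | app/core.py | get_center_index_in_aligned
-- ===== SOURCE A (Python) =====
-- def get_center_index_in_aligned(aligned_seq, original_center=5):
--     """
--     Given an aligned sequence (with possible gaps), find the position
--     in the aligned sequence corresponding to the 'original_center'-th real base.
--     """
--     real_bases_count = 0
--     for i, base in enumerate(aligned_seq):
--         if base != '-':
--             if real_bases_count == original_center:
--                 return i
--             real_bases_count += 1
--     return None
-- ===== SOURCE B (Python) =====
-- def get_center_index_in_aligned(aligned_seq, original_center=5):
--     # Jump-ahead algorithm: the answer j satisfies j = original_center + (gaps in s[:j+1]).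
--     # Start at the gap-free candidate j = original_center; repeatedly count the gaps in the
--     # not-yet-counted window and jump the candidate forward by that many; a window with no
--     # gaps means the candidate is the fixed point, i.e. the original_center-th real base.
--     if original_center < 0:
--         return None
--     n = len(aligned_seq)
--     lo = 0
--     j = original_center
--     while j < n:
--         d = aligned_seq.count('-', lo, j + 1)
--         if d == 0:
--             return j
--         lo = j + 1
--         j += d
--     return None
-- ===== Notes on version B (the rewrite author's own statement) =====
-- stated objective: faster
-- what changed: Replaces A's per-character Python-level counting scan with a jump-ahead fixed-point iteration: start at candidate index original_center and repeatedly advance it by the number of gaps found in the not-yet-examined window via str.count over a range, returning when a window is gap-free.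
import Mathlib
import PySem

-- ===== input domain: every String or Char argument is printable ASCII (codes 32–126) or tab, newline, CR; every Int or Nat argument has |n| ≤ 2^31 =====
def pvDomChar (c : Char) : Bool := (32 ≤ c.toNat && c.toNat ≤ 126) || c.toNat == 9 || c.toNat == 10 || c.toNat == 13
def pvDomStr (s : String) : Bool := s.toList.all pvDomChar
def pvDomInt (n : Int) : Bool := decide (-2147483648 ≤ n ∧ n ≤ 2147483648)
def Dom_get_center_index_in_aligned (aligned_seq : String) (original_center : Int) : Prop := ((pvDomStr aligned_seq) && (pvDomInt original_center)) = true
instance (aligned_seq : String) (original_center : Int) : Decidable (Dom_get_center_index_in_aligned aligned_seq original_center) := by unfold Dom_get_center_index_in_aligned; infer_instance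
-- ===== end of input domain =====

-- B replaces A's base-by-base counting scan by a jump-ahead fixed-point iteration: start at
-- candidate index original_center and repeatedly advance it by the number of gaps counted in
-- the not-yet-examined window (str.count over a range); objective: faster (constant factor, measured).

-- ===== PORT A =====
-- A's loop: enumerate with a running count of real bases, early return on the match.
def pvGoA (oc : Int) : List Char → Int → Int → Option Int
  | [], _, _ => none
  | c :: rest, i, cnt =>
    if c ≠ '-' then
      (if cnt = oc then some i else pvGoA oc rest (i + 1) (cnt + 1))
    else pvGoA oc rest (i + 1) cnt

def get_center_index_in_aligned (aligned_seq : String) (original_center : Int) : Option Int :=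
  pvGoA original_center aligned_seq.toList 0 0

-- ===== PORT B =====
-- B's while loop. aligned_seq.count('-', lo, j+1) is ported exactly as the element count of
-- the slice s[lo : j+1] (Python's str.count of a one-character needle over a range; lo and
-- j+1 are nonnegative on every call).
def pvGoB (s : List Char) (n : Int) (lo j : Int) : Option Int :=
  if j < n then
    let d := (PySem.List.slice s (some lo) (some (j + 1))).count '-'
    if d = 0 then some j
    else pvGoB s n (j + 1) (j + (d : Int))
  else none
termination_by (n - j).toNat
decreasing_by omega

def get_center_index_in_aligned_alt (aligned_seq : String) (original_center : Int) : Option Int :=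
  if original_center < 0 then none
  else pvGoB aligned_seq.toList (aligned_seq.toList.length : Int) 0 original_center

-- ===== PRECONDITION & SPEC =====
def Spec_get_center_index_in_aligned (aligned_seq : String) (original_center : Int) (out : Option Int) : Prop := out = get_center_index_in_aligned_alt aligned_seq original_center
instance (aligned_seq : String) (original_center : Int) (out : Option Int) : Decidable (Spec_get_center_index_in_aligned aligned_seq original_center out) := by unfold Spec_get_center_index_in_aligned; infer_instance

-- ===== CLAIM (what is proved, stated in full; the proofs are below) =====
def Claim_equal_get_center_index_in_aligned : Prop := ∀ (aligned_seq : String) (original_center : Int), Dom_get_center_index_in_aligned aligned_seq original_center → Spec_get_center_index_in_aligned aligned_seq original_center (get_center_index_in_aligned aligned_seq original_center)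

-- ===== LEMMAS AND PROOFS =====

-- The list of (Nat) positions of the non-gap characters: the common reference point both
-- ports are proved to compute a lookup into.
def pvPos : List Char → List Nat
  | [] => []
  | c :: rest => if c ≠ '-' then 0 :: (pvPos rest).map (· + 1) else (pvPos rest).map (· + 1)

theorem pvPos_length (cs : List Char) : (pvPos cs).length = cs.length - cs.count '-' := by
  induction cs with
  | nil => simp [pvPos]
  | cons c rest ih =>
    have hle := List.count_le_length (l := rest) (a := '-')
    by_cases hc : c = '-' <;> simp [pvPos, hc, List.count_cons, ih] <;> omega

-- A's filtered enumeration is pvPos shifted by the start offset.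
theorem pvPos_spec (cs : List Char) : ∀ i : Int,
    (PySem.List.enumerate cs i).filterMap
        (fun p => if p.2 ≠ '-' then some p.1 else none)
      = (pvPos cs).map (fun v : Nat => (v : Int) + i) := by
  induction cs with
  | nil => intro i; simp [pvPos, PySem.List.enumerate]
  | cons c rest ih =>
    intro i
    rw [PySem.List.enumerate_cons, List.filterMap_cons]
    by_cases hc : c = '-'
    · subst hc
      simp only [ne_eq, not_true_eq_false, if_false]
      rw [ih (i + 1)]
      rw [show pvPos ('-' :: rest) = (pvPos rest).map (· + 1) from by simp [pvPos]]
      rw [List.map_map]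
      exact List.map_congr_left fun v _ => by simp; push_cast; ring
    · simp only [ne_eq, hc, not_false_iff, if_pos]
      rw [ih (i + 1)]
      rw [show pvPos (c :: rest) = 0 :: (pvPos rest).map (· + 1) from by simp [pvPos, hc]]
      rw [List.map_cons, List.map_map]
      rw [show ((0 : Nat) : Int) + i = i by ring]
      exact congrArg _ (List.map_congr_left fun v _ => by simp; push_cast; ring)

-- The t-th character being a real base, its index t sits at slot (real bases before t).
theorem pvPos_get (cs : List Char) : ∀ (t : Nat) (ht : t < cs.length), cs[t] ≠ '-' →
    (pvPos cs)[t - (cs.take t).count '-']? = some t := by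
  induction cs with
  | nil => intro t ht; simp at ht
  | cons c rest ih =>
    intro t ht hne
    cases t with
    | zero => simp at hne; simp [pvPos, hne]
    | succ t =>
      have ht' : t < rest.length := by simpa using ht
      have hne' : rest[t] ≠ '-' := by simpa using hne
      have hg : (rest.take t).count '-' ≤ t := by
        calc (rest.take t).count '-' ≤ (rest.take t).length := List.count_le_length
          _ ≤ t := by simp
      by_cases hc : c = '-'
      · have hidx : t + 1 - ((c :: rest).take (t + 1)).count '-' = t - (rest.take t).count '-' := by
          simp [List.take_succ_cons, List.count_cons, hc]
        rw [hidx]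
        simp [pvPos, hc, List.getElem?_map, ih t ht' hne']
      · have hidx : t + 1 - ((c :: rest).take (t + 1)).count '-' = (t - (rest.take t).count '-') + 1 := by
          simp [List.take_succ_cons, List.count_cons, hc]
          omega
        rw [hidx]
        simp [pvPos, hc, List.getElem?_map, ih t ht' hne']

-- Loop invariant of B's jump-ahead iteration: if the candidate t equals k plus the gaps
-- already counted (those of cs[:a]) and a ≤ t, the loop returns the k-th non-gap position.
theorem pvGoB_eq (cs : List Char) : ∀ (m a t k : Nat),
    cs.length - t ≤ m → a ≤ t → t = k + (cs.take a).count '-' →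
    pvGoB cs (cs.length : Int) (a : Int) (t : Int)
      = ((pvPos cs)[k]?).map (fun v : Nat => (v : Int)) := by
  intro m
  induction m with
  | zero =>
    intro a t k hfuel ha ht
    have hge : cs.length ≤ t := by omega
    rw [pvGoB]
    have hnlt : ¬ ((t : Int) < (cs.length : Int)) := by exact_mod_cast not_lt.2 hge
    rw [if_neg hnlt]
    have hcnt := (List.take_sublist a cs).count_le '-'
    have hk : (pvPos cs).length ≤ k := by
      rw [pvPos_length]
      have := List.count_le_length (l := cs) (a := '-')
      omega
    simp [List.getElem?_eq_none hk]
  | succ m ih =>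
    intro a t k hfuel ha ht
    by_cases hlt : t < cs.length
    · rw [pvGoB]
      have hlt' : (t : Int) < (cs.length : Int) := by exact_mod_cast hlt
      rw [if_pos hlt']
      have hslice : PySem.List.slice cs (some (a : Int)) (some ((t : Int) + 1))
          = (cs.drop a).take (t + 1 - a) := by
        have h1 : ((t : Int) + 1) = ((t + 1 : Nat) : Int) := by push_cast; ring
        rw [h1, PySem.List.slice_natCast]
      rw [hslice]
      set w : List Char := (cs.drop a).take (t + 1 - a) with hw
      have hcount : (cs.take (t + 1)).count '-' = (cs.take a).count '-' + w.count '-' := by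
        have hsum : a + (t + 1 - a) = t + 1 := by omega
        rw [← hsum, List.take_add, List.count_append]
      by_cases hd : w.count '-' = 0
      · simp only [hd, if_pos, Nat.cast_zero]
        -- cs[t] sits inside the gap-free window w, hence is a real base
        have hdlen : t - a < (cs.drop a).length := by simp; omega
        have h1 : (cs[t]'hlt) = (cs.drop a)[t - a]'hdlen := by
          rw [List.getElem_drop]; congr 1; omega
        have h2 : t - a < w.length := by rw [hw]; simp; omega
        have h3 : w[t - a]'h2 = (cs.drop a)[t - a]'hdlen := by
          exact List.getElem_take
        have hne : cs[t]'hlt ≠ '-' := by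
          intro hEq
          have hmem : '-' ∈ w := by rw [← hEq, h1, ← h3]; exact List.getElem_mem h2
          have := List.count_pos_iff.2 hmem
          omega
        have htake : (cs.take (t + 1)).count '-' = (cs.take t).count '-' := by
          have hg : cs[t]? = some (cs[t]'hlt) := List.getElem?_eq_getElem hlt
          rw [List.take_add_one, hg, List.count_append]
          simp [List.count_cons]
          exact fun h => hne h
        have hk : k = t - (cs.take t).count '-' := by omega
        rw [hk, pvPos_get cs t hlt hne]
        simp
      · rw [if_neg hd]
        have hcast : (t : Int) + 1 = ((t + 1 : Nat) : Int) := by push_cast; ring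
        have hcast2 : (t : Int) + (w.count '-' : Int) = ((t + w.count '-' : Nat) : Int) := by
          push_cast; ring
        rw [hcast, hcast2]
        exact ih (t + 1) (t + w.count '-') k (by omega) (by omega) (by omega)
    · rw [pvGoB]
      have hnlt : ¬ ((t : Int) < (cs.length : Int)) := by exact_mod_cast hlt
      rw [if_neg hnlt]
      have hcnt := (List.take_sublist a cs).count_le '-'
      have hk : (pvPos cs).length ≤ k := by
        rw [pvPos_length]
        have := List.count_le_length (l := cs) (a := '-')
        omega
      simp [List.getElem?_eq_none hk]

-- A's scan from position i with count cnt is a guarded lookup into the filtered enumeration.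
theorem pvGoA_eq (oc : Int) (cs : List Char) (i cnt : Int) :
    pvGoA oc cs i cnt =
      (let ps := (PySem.List.enumerate cs i).filterMap
          (fun p => if p.2 ≠ '-' then some p.1 else none)
       if 0 ≤ oc - cnt ∧ oc - cnt < ps.length then ps[(oc - cnt).toNat]? else none) := by
  induction cs generalizing i cnt with
  | nil => simp [pvGoA, PySem.List.enumerate]
  | cons c rest ih =>
    simp only [PySem.List.enumerate_cons, List.filterMap_cons]
    by_cases hc : c = '-'
    · simp [pvGoA, hc, ih (i + 1) cnt]
    · simp only [pvGoA, hc, ne_eq, not_false_iff, if_pos]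
      by_cases heq : cnt = oc
      · subst heq
        simp
      · rw [if_neg heq, ih (i + 1) (cnt + 1)]
        simp only [ne_eq, List.length_cons]
        set ps := (PySem.List.enumerate rest (i + 1)).filterMap
            (fun p => if p.2 ≠ '-' then some p.1 else none) with hps
        push_cast
        by_cases h0 : 0 ≤ oc - cnt ∧ oc - cnt < (ps.length : Int) + 1
        · have h1 : 0 ≤ oc - (cnt + 1) ∧ oc - (cnt + 1) < (ps.length : Int) := by omega
          rw [if_pos h0, if_pos h1]
          have hnat : (oc - cnt).toNat = (oc - (cnt + 1)).toNat + 1 := by omega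
          rw [hnat, List.getElem?_cons_succ]
        · have h1 : ¬ (0 ≤ oc - (cnt + 1) ∧ oc - (cnt + 1) < (ps.length : Int)) := by omega
          rw [if_neg h0, if_neg h1]

-- ===== VERDICT (by name: the statement is the Claim_ definition above) =====
theorem get_center_index_in_aligned_spec : Claim_equal_get_center_index_in_aligned := by
  intro s oc _
  unfold Spec_get_center_index_in_aligned get_center_index_in_aligned get_center_index_in_aligned_alt
  rw [pvGoA_eq]
  simp only [pvPos_spec s.toList 0, add_zero, sub_zero, List.length_map]
  by_cases hneg : oc < 0
  · rw [if_pos hneg, if_neg (by omega)]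
  · rw [if_neg hneg]
    have hoc : (oc.toNat : Int) = oc := Int.toNat_of_nonneg (by omega)
    have hB := pvGoB_eq s.toList s.toList.length 0 oc.toNat oc.toNat (by omega) (by omega) (by simp)
    rw [Nat.cast_zero, hoc] at hB
    rw [hB]
    by_cases hin : 0 ≤ oc ∧ oc < ((pvPos s.toList).length : Int)
    · rw [if_pos hin, List.getElem?_map]
    · rw [if_neg hin]
      have hk : (pvPos s.toList).length ≤ oc.toNat := by omega
      simp [List.getElem?_eq_none hk]
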